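-- pv_equiv track=rewrite | github.com/AndreasInfo/cupp2 | cupp.py | calc_list_product
-- ===== SOURCE A (Python) =====
-- import itertools
--
-- def calc_list_product(input: list, length: int) -> list:
--     """Calculate cartesian product of input."""
--     result = []
--     for x in range(length):
--         result += [
--             "".join(combination)
--             for combination in itertools.product(input, repeat=x + 1)
--         ]
--     result = list(set(result))
--     result.sort()
--     return result
-- ===== SOURCE B (Python) =====
-- def calc_list_product(input: list, length: int) -> list:
--     """Calculate cartesian product of input."""
--     elems = set(input)
--     lang = set()
--     for _ in range(length):
--         lang = elems | {e + s for e in elems for s in lang}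
--     return sorted(lang)
-- ===== Notes on version B (the rewrite author's own statement) =====
-- stated objective: alternative
-- what changed: B never enumerates tuples: it computes the answer as the length-th Kleene iterate of the language map L -> E | E.L over SETS of distinct strings (dedup at every level, prepend-side extension), replacing A's per-length itertools.product tuple enumeration and single final dedup of the accumulated list; each distinct string is extended once per level instead of once per tuple that joins to it.
import Mathlib
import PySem

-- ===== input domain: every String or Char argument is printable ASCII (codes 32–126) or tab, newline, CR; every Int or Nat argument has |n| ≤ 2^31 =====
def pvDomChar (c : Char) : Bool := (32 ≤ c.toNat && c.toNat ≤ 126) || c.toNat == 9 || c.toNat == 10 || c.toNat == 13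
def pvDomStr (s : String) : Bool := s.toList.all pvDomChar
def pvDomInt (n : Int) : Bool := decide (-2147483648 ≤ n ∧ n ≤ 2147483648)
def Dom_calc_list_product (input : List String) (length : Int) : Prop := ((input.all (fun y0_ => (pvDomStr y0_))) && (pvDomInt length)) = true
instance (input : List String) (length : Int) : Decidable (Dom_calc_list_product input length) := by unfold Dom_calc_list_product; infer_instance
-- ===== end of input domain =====

-- B computes the result as the length-th Kleene iterate of L ↦ E ∪ E·L over sets of
-- distinct strings (dedup at every level, prepend extension), instead of A's per-length
-- itertools.product tuple enumeration with one final dedup; alternative algorithm, same output.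


-- ===== PORT A =====
-- "".join(combination)
def pvJoin (l : List String) : String := PySem.Str.join "" l

-- itertools.product(input, repeat=n): tuples in order, leftmost component varying slowest
def pvProd (input : List String) : Nat → List (List String)
  | 0 => [[]]
  | n + 1 => input.flatMap (fun x => (pvProd input n).map (fun t => x :: t))

def calc_list_product (input : List String) (length : Int) : List String :=
  let result := (PySem.List.pyRange 0 length 1).foldl
    (fun r x => r ++ (pvProd input (x + 1).toNat).map pvJoin) []
  PySem.List.sorted (PySem.Set.ofList result) (fun s => s) false

-- ===== PORT B =====
-- one step of the language map: elems | {e + s for e in elems for s in lang}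
def pvStep (elems : PySem.Set String) (lang : PySem.Set String) : PySem.Set String :=
  PySem.Set.union elems
    (PySem.Set.ofList (elems.flatMap (fun e => lang.map (fun s => e ++ s))))

def calc_list_product_alt (input : List String) (length : Int) : List String :=
  let elems := PySem.Set.ofList input
  let lang := (PySem.List.pyRange 0 length 1).foldl
    (fun lang _ => pvStep elems lang) PySem.Set.empty
  PySem.List.sorted lang (fun s => s) false

-- ===== PRECONDITION & SPEC =====
def Spec_calc_list_product (input : List String) (length : Int) (out : List String) : Prop := out = calc_list_product_alt input length
instance (input : List String) (length : Int) (out : List String) : Decidable (Spec_calc_list_product input length out) := by unfold Spec_calc_list_product; infer_instance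

-- ===== CLAIM =====
def Claim_equal_calc_list_product : Prop := ∀ (input : List String) (length : Int), Dom_calc_list_product input length → Spec_calc_list_product input length (calc_list_product input length)

-- ===== LEMMAS AND PROOFS =====

-- "".join as character-list flatten
theorem pvJoin_toList (l : List String) :
    (pvJoin l).toList = (l.map String.toList).flatten := by
  induction l with
  | nil => simp [pvJoin, PySem.Str.toList_join, PySem.Chars.join, List.intercalate]
  | cons p rest ih =>
    cases rest with
    | nil => simp [pvJoin, PySem.Str.toList_join, PySem.Chars.join, List.intercalate]
    | cons q r =>
      simp only [pvJoin, PySem.Str.toList_join, List.map_cons] at ih ⊢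
      rw [PySem.Chars.join_cons_cons, ih]
      simp

theorem pvJoin_cons (x : String) (t : List String) :
    pvJoin (x :: t) = x ++ pvJoin t := by
  apply String.ext
  simp [pvJoin_toList]

theorem pvJoin_singleton (x : String) : pvJoin [x] = x := by
  apply String.ext
  simp [pvJoin_toList]

-- A's level k, as joined strings
def pvLevel (input : List String) (k : Nat) : List String :=
  (pvProd input k).map pvJoin

theorem mem_pvLevel_one (input : List String) (s : String) :
    s ∈ pvLevel input 1 ↔ s ∈ input := by
  simp only [pvLevel, pvProd, List.mem_map, List.mem_flatMap, List.mem_singleton]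
  constructor
  · rintro ⟨t, ⟨x, hx, a, rfl, rfl⟩, rfl⟩
    simpa [pvJoin_singleton] using hx
  · intro hs
    exact ⟨[s], ⟨s, hs, [], rfl, rfl⟩, pvJoin_singleton s⟩

theorem mem_pvLevel_succ (input : List String) (k : Nat) (s : String) :
    s ∈ pvLevel input (k + 1) ↔ ∃ e ∈ input, ∃ t ∈ pvLevel input k, s = e ++ t := by
  simp only [pvLevel, pvProd, List.mem_map, List.mem_flatMap]
  constructor
  · rintro ⟨u, ⟨x, hx, t, ht, rfl⟩, rfl⟩
    exact ⟨x, hx, pvJoin t, ⟨t, ht, rfl⟩, pvJoin_cons x t⟩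
  · rintro ⟨e, he, w, ⟨t, ht, rfl⟩, rfl⟩
    exact ⟨e :: t, ⟨e, he, t, ht, rfl⟩, pvJoin_cons e t⟩

-- a foldl over a range that ignores its index is a plain iterate
theorem foldl_pyRange_ignore {α : Type} (F : α → α) :
    ∀ (n : Nat) (a b : Int), n = (b - a).toNat → ∀ (init : α),
    (PySem.List.pyRange a b 1).foldl (fun l _ => F l) init = F^[n] init := by
  intro n
  induction n with
  | zero =>
    intro a b hn init
    rw [PySem.List.pyRange_one_eq_nil (by omega)]
    simp
  | succ m ih =>
    intro a b hn init
    rw [PySem.List.pyRange_one_cons (by omega), List.foldl_cons,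
      ih (a + 1) b (by omega), Function.iterate_succ_apply]

-- membership in one step of B
theorem mem_pvStep (input : List String) (lang : List String) (s : String) :
    s ∈ pvStep (PySem.Set.ofList input) lang ↔
      s ∈ input ∨ ∃ e ∈ input, ∃ t ∈ lang, s = e ++ t := by
  simp only [pvStep, PySem.Set.mem_union, PySem.Set.mem_ofList, List.mem_flatMap,
    List.mem_map]
  constructor
  · rintro (h | ⟨e, he, t, ht, rfl⟩)
    · exact Or.inl h
    · exact Or.inr ⟨e, he, t, ht, rfl⟩
  · rintro (h | ⟨e, he, t, ht, rfl⟩)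
    · exact Or.inl h
    · exact Or.inr ⟨e, he, t, ht, rfl⟩

-- B's iterate n holds exactly the joins of 1..n input elements
theorem mem_iterate_pvStep (input : List String) :
    ∀ (n : Nat) (s : String),
    s ∈ (pvStep (PySem.Set.ofList input))^[n] PySem.Set.empty ↔
      ∃ k, 1 ≤ k ∧ k ≤ n ∧ s ∈ pvLevel input k := by
  intro n
  induction n with
  | zero =>
    intro s
    simp only [Function.iterate_zero, id]
    constructor
    · intro h; exact absurd h (by simp [PySem.Set.empty])
    · rintro ⟨k, h1, h2, _⟩; omega
  | succ m ih =>
    intro s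
    rw [Function.iterate_succ_apply', mem_pvStep]
    constructor
    · rintro (h | ⟨e, he, t, ht, rfl⟩)
      · exact ⟨1, le_refl 1, by omega, (mem_pvLevel_one input s).mpr h⟩
      · obtain ⟨k, h1, h2, hk⟩ := (ih t).mp ht
        exact ⟨k + 1, by omega, by omega,
          (mem_pvLevel_succ input k _).mpr ⟨e, he, t, hk, rfl⟩⟩
    · rintro ⟨k, h1, h2, hk⟩
      cases k with
      | zero => omega
      | succ j =>
        cases j with
        | zero => exact Or.inl ((mem_pvLevel_one input s).mp hk)
        | succ i =>
          obtain ⟨e, he, t, ht, rfl⟩ := (mem_pvLevel_succ input (i + 1) s).mp hk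
          exact Or.inr ⟨e, he, t, (ih t).mpr ⟨i + 1, by omega, by omega, ht⟩, rfl⟩

-- B's iterate is duplicate-free
theorem nodup_iterate_pvStep (input : List String) :
    ∀ (n : Nat), ((pvStep (PySem.Set.ofList input))^[n] PySem.Set.empty).Nodup := by
  intro n
  induction n with
  | zero => simp [PySem.Set.empty]
  | succ m ih =>
    rw [Function.iterate_succ_apply']
    exact PySem.Set.nodup_union _ _ (PySem.Set.nodup_ofList input)

-- A's accumulated result holds exactly the joins of 1..length input elements
theorem mem_resultA (input : List String) (length : Int) (s : String) :
    s ∈ (PySem.List.pyRange 0 length 1).foldl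
        (fun r x => r ++ (pvProd input (x + 1).toNat).map pvJoin) [] ↔
      ∃ k, 1 ≤ k ∧ k ≤ length.toNat ∧ s ∈ pvLevel input k := by
  rw [PySem.List.foldl_append_eq_flatMap]
  simp only [List.nil_append, List.mem_flatMap, PySem.List.mem_pyRange_one]
  constructor
  · rintro ⟨x, ⟨hx0, hxl⟩, hs⟩
    exact ⟨(x + 1).toNat, by omega, by omega, hs⟩
  · rintro ⟨k, h1, h2, hk⟩
    refine ⟨(k : Int) - 1, ⟨by omega, by omega⟩, ?_⟩
    have : ((k : Int) - 1 + 1).toNat = k := by omega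
    rw [this]
    exact hk

-- ===== VERDICT =====
theorem calc_list_product_spec : Claim_equal_calc_list_product := by
  intro input length _
  show calc_list_product input length = calc_list_product_alt input length
  show PySem.List.sorted (PySem.Set.ofList ((PySem.List.pyRange 0 length 1).foldl
      (fun r x => r ++ (pvProd input (x + 1).toNat).map pvJoin) [])) (fun s => s) false
    = PySem.List.sorted ((PySem.List.pyRange 0 length 1).foldl
      (fun lang _ => pvStep (PySem.Set.ofList input) lang) PySem.Set.empty) (fun s => s) false
  rw [foldl_pyRange_ignore (pvStep (PySem.Set.ofList input)) length.toNat 0 length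
    (by omega)]
  rw [PySem.List.sorted_id_eq_sorted_id_iff_perm]
  rw [List.perm_ext_iff_of_nodup (PySem.Set.nodup_ofList _)
    (nodup_iterate_pvStep input length.toNat)]
  intro s
  rw [PySem.Set.mem_ofList, mem_resultA, mem_iterate_pvStep]
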